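-- pv_equiv track=rewrite | github.com/Arete-sqrt81/GrimDarkCrunch | damage_sim.py | allocate_damage
-- ===== SOURCE A (Python) =====
-- def allocate_damage(group_damage_lists, num_models, w_per_model):
--     # Simulates forced focus on wounded models (rules: must allocate to wounded/allocation-received model first)
--     # Starts with first model, finishes it before moving on (attacker optimal = defender forced focus)
--     remaining = [w_per_model] * num_models
--     destroyed = 0
--     applied = 0
--     current_target = 0
--
--     for group_damages in group_damage_lists:
--         for dmg in group_damages:
--             if current_target >= num_models:
--                 break
--             # Apply to current target (wounded or allocated)
--             dmg_applied = min(dmg, remaining[current_target])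
--             remaining[current_target] -= dmg_applied  # excess lost
--             applied += dmg_applied
--             if remaining[current_target] <= 0:
--                 destroyed += 1
--                 current_target += 1  # move to next model
--                 if current_target >= num_models:
--                     break
--
--     # Partial on the last wounded model
--     partial = 0
--     if current_target < num_models and remaining[current_target] < w_per_model:
--         partial = w_per_model - remaining[current_target]
--
--     return destroyed, partial, applied
-- ===== SOURCE B (Python) =====
-- def allocate_damage(group_damage_lists, num_models, w_per_model):
--     # Model-major decomposition: one shared stream of damage values, outer loop
--     # over models; each model pulls damage until it drops, leftover computed on exit.
--     flat = iter(d for g in group_damage_lists for d in g)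
--     destroyed = 0
--     applied = 0
--     for _ in range(num_models):
--         remaining = w_per_model
--         while True:
--             d = next(flat, None)
--             if d is None:
--                 partial = w_per_model - remaining if remaining < w_per_model else 0
--                 return destroyed, partial, applied
--             a = min(d, remaining)
--             applied += a
--             remaining -= a
--             if remaining <= 0:
--                 break
--         destroyed += 1
--     return destroyed, 0, applied
-- ===== Notes on version B (the rewrite author's own statement) =====
-- stated objective: alternative
-- what changed: Damage-major nested loops over a mutable per-model wounds array are replaced by a model-major loop pulling from one flattened damage stream, tracking only the current model's remaining wounds (no array, no index bookkeeping).
import Mathlib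
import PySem

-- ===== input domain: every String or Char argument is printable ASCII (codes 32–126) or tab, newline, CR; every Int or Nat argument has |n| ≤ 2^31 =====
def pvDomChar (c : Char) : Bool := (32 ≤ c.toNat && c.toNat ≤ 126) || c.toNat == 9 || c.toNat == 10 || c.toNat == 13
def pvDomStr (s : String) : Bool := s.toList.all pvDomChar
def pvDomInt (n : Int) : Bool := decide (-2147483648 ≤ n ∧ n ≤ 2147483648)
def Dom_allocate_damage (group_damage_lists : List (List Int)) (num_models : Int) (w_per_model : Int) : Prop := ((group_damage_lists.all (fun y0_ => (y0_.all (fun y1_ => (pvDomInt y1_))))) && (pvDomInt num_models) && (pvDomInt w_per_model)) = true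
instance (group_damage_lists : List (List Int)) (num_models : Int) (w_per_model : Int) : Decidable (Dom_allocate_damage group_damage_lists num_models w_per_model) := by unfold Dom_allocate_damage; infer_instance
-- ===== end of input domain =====

-- B replaces A's damage-major nested loops over a mutable wounds array by a model-major
-- loop over one flattened damage stream (alternative decomposition, same cost).

-- ===== PORT A =====
-- inner 'for dmg in group_damages' loop of A; state = (remaining, destroyed, applied, current_target)
def innerA (n : Int) : List Int → List Int → Int → Int → Int → List Int × Int × Int × Int
  | [], rem, dest, app, cur => (rem, dest, app, cur)
  | d :: ds, rem, dest, app, cur =>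
    if cur ≥ n then (rem, dest, app, cur)   -- break
    else
      let r := (PySem.List.pyGet? rem cur).getD 0   -- in range whenever reached (cur < n = rem.length); getD only totalizes
      let da := min d r
      let rem' := PySem.List.pySetD rem cur (r - da)   -- remaining[current_target] -= dmg_applied
      let app' := app + da
      if r - da ≤ 0 then
        (if cur + 1 ≥ n then (rem', dest + 1, app', cur + 1)   -- break
         else innerA n ds rem' (dest + 1) app' (cur + 1))
      else innerA n ds rem' dest app' cur

def allocate_damage (group_damage_lists : List (List Int)) (num_models : Int) (w_per_model : Int) : Int × Int × Int :=
  let s0 : List Int × Int × Int × Int := (List.replicate num_models.toNat w_per_model, 0, 0, 0)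
  let s := group_damage_lists.foldl (fun st g => innerA num_models g st.1 st.2.1 st.2.2.1 st.2.2.2) s0
  let partial_ :=
    if s.2.2.2 < num_models ∧ (PySem.List.pyGet? s.1 s.2.2.2).getD 0 < w_per_model
    then w_per_model - (PySem.List.pyGet? s.1 s.2.2.2).getD 0 else 0
  (s.2.1, partial_, s.2.2.1)

-- ===== PORT B =====
-- the inner 'while True' of B: pull damage until the current model drops or the stream ends
def innerB : List Int → Int → Int → (List Int × Int) ⊕ (Int × Int)
  | [], r, app => Sum.inr (r, app)               -- stream exhausted: return (remaining, applied)
  | d :: ds, r, app =>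
    let a := min d r
    if r - a ≤ 0 then Sum.inl (ds, app + a)       -- model destroyed: leftover stream, applied
    else innerB ds (r - a) (app + a)

-- the outer 'for _ in range(num_models)' loop of B
def outerB (w : Int) : Nat → List Int → Int → Int → Int × Int × Int
  | 0, _, dest, app => (dest, 0, app)
  | k + 1, ds, dest, app =>
    match innerB ds w app with
    | Sum.inl (ds', app') => outerB w k ds' (dest + 1) app'
    | Sum.inr (r, app') => (dest, if r < w then w - r else 0, app')

def allocate_damage_alt (group_damage_lists : List (List Int)) (num_models : Int) (w_per_model : Int) : Int × Int × Int :=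
  outerB w_per_model num_models.toNat group_damage_lists.flatten 0 0

-- ===== PRECONDITION & SPEC =====
def Spec_allocate_damage (group_damage_lists : List (List Int)) (num_models : Int) (w_per_model : Int) (out : Int × Int × Int) : Prop := out = allocate_damage_alt group_damage_lists num_models w_per_model
instance (group_damage_lists : List (List Int)) (num_models : Int) (w_per_model : Int) (out : Int × Int × Int) : Decidable (Spec_allocate_damage group_damage_lists num_models w_per_model out) := by unfold Spec_allocate_damage; infer_instance

-- ===== CLAIM (what is proved, stated in full; the proofs are below) =====
def Claim_equal_allocate_damage : Prop := ∀ (group_damage_lists : List (List Int)) (num_models : Int) (w_per_model : Int), Dom_allocate_damage group_damage_lists num_models w_per_model → Spec_allocate_damage group_damage_lists num_models w_per_model (allocate_damage group_damage_lists num_models w_per_model)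

-- ===== LEMMAS AND PROOFS =====

-- once current_target ≥ num_models, innerA is the identity
theorem innerA_stop (n : Int) (ds rem : List Int) (dest app cur : Int) (h : cur ≥ n) :
    innerA n ds rem dest app cur = (rem, dest, app, cur) := by
  cases ds with
  | nil => rfl
  | cons d ds => simp [innerA, h]

theorem innerA_append (n : Int) (xs ys rem : List Int) (dest app cur : Int) :
    innerA n (xs ++ ys) rem dest app cur =
      (fun s : List Int × Int × Int × Int => innerA n ys s.1 s.2.1 s.2.2.1 s.2.2.2)
        (innerA n xs rem dest app cur) := by
  induction xs generalizing rem dest app cur with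
  | nil => rfl
  | cons d xs ih =>
    by_cases h : cur ≥ n
    · simp [innerA, h, innerA_stop n ys rem dest app cur h]
    · simp only [List.cons_append, innerA, if_neg h]
      split
      · split
        · next h2 =>
          exact (innerA_stop n ys _ _ _ _ h2).symm
        · exact ih ..
      · exact ih ..

theorem foldl_innerA (n : Int) (gdl : List (List Int)) (rem : List Int) (dest app cur : Int) :
    gdl.foldl (fun st g => innerA n g st.1 st.2.1 st.2.2.1 st.2.2.2) (rem, dest, app, cur)
      = innerA n gdl.flatten rem dest app cur := by
  induction gdl generalizing rem dest app cur with
  | nil => rfl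
  | cons g gdl ih =>
    simp only [List.foldl_cons, List.flatten_cons, innerA_append]
    obtain ⟨r, d, a, c⟩ := innerA n g rem dest app cur
    exact ih ..

-- the "finish" step of A: compute partial from the final state
def finishA (n w : Int) (s : List Int × Int × Int × Int) : Int × Int × Int :=
  (s.2.1,
   if s.2.2.2 < n ∧ (PySem.List.pyGet? s.1 s.2.2.2).getD 0 < w then w - (PySem.List.pyGet? s.1 s.2.2.2).getD 0 else 0,
   s.2.2.1)

theorem lookup_mid (pre t : List Int) (r : Int) :
    (PySem.List.pyGet? (pre ++ r :: t) (pre.length : Int)).getD 0 = r := by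
  simp

theorem set_mid (pre t : List Int) (r v : Int) :
    PySem.List.pySetD (pre ++ r :: t) (pre.length : Int) v = pre ++ v :: t := by
  simp [PySem.List.pySetD_natCast, List.set_append_right _ _ (Nat.le_refl pre.length)]

-- main invariant: A's loop from a state whose wounds array is pre ++ r :: replicate k w
-- (current target pre.length, k untouched models behind) matches B's stream consumption
theorem main_inv (w n : Int) (ds : List Int) (pre : List Int) (k : Nat) (r dest app : Int)
    (hn : n = (pre.length : Int) + k + 1) :
    finishA n w (innerA n ds (pre ++ r :: List.replicate k w) dest app (pre.length : Int))
      = match innerB ds r app with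
        | Sum.inl (ds', app') => outerB w k ds' (dest + 1) app'
        | Sum.inr (r', app') => (dest, if r' < w then w - r' else 0, app') := by
  induction ds generalizing pre k r dest app with
  | nil =>
    simp only [innerA, innerB, finishA, lookup_mid]
    have h1 : (pre.length : Int) < n := by omega
    by_cases h2 : r < w
    · simp [h1, h2]
    · simp [h2]
  | cons d ds ih =>
    have hlt : ¬ ((pre.length : Int) ≥ n) := by omega
    simp only [innerA, if_neg hlt, lookup_mid, set_mid, innerB]
    by_cases hdead : r - min d r ≤ 0
    · have hzero : r - min d r = 0 := by
        rcases le_total d r with h | h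
        · simp only [min_eq_left h] at hdead ⊢; omega
        · simp [min_eq_right h]
      simp only [if_pos hdead]
      cases k with
      | zero =>
        have hbrk : (pre.length : Int) + 1 ≥ n := by omega
        simp [if_pos hbrk, finishA, outerB, show ¬ ((pre.length : Int) + 1 < n) by omega, hzero]
      | succ k' =>
        have hbrk : ¬ ((pre.length : Int) + 1 ≥ n) := by omega
        simp only [if_neg hbrk]
        have hre : pre ++ (r - min d r) :: List.replicate (k' + 1) w
            = (pre ++ [(0 : Int)]) ++ w :: List.replicate k' w := by
          simp [hzero, List.replicate_succ]
        have hcur : (pre.length : Int) + 1 = (((pre ++ [(0 : Int)]).length : Int)) := by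
          simp
        rw [hre, hcur, ih (pre ++ [0]) k' w (dest + 1) (app + min d r) (by simp; omega)]
        simp only [outerB]
    · simp only [if_neg hdead]
      exact ih pre k (r - min d r) dest (app + min d r) hn

theorem ports_agree (gdl : List (List Int)) (n w : Int) :
    allocate_damage gdl n w = allocate_damage_alt gdl n w := by
  unfold allocate_damage allocate_damage_alt
  show finishA n w (gdl.foldl (fun st g => innerA n g st.1 st.2.1 st.2.2.1 st.2.2.2)
      (List.replicate n.toNat w, 0, 0, 0)) = outerB w n.toNat gdl.flatten 0 0
  rw [foldl_innerA]
  rcases hk : n.toNat with _ | k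
  · -- num_models ≤ 0: the loop breaks immediately
    have h0 : (0 : Int) ≥ n := by omega
    rw [innerA_stop n gdl.flatten (List.replicate 0 w) 0 0 0 h0]
    simp [finishA, outerB, show ¬ ((0 : Int) < n) by omega]
  · -- num_models = k + 1
    have hrep : List.replicate (k + 1) w = [] ++ w :: List.replicate k w := by
      simp [List.replicate_succ]
    have h := main_inv w n gdl.flatten [] k w 0 0 (by simp; omega)
    simp only [List.length_nil, Nat.cast_zero] at h
    rw [hrep, h]
    simp only [outerB]

-- ===== VERDICT (by name: the statement is the Claim_ definition above) =====
theorem allocate_damage_spec : Claim_equal_allocate_damage := by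
  intro gdl n w _
  unfold Spec_allocate_damage
  exact ports_agree gdl n w
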